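-- pv_equiv track=rewrite | github.com/hariharanragothaman/codeforces-solutions | contests/230/230A-dragons.py | solve
-- ===== SOURCE A (Python) =====
-- from collections import deque
--
-- def solve(s, nums):
--     q = deque(nums)
--     while q:
--         xi, yi = q.popleft()
--         if s <= xi:
--             return False
--         elif s > xi:
--             s += yi
--     return True
-- ===== SOURCE B (Python) =====
-- def solve(s, nums):
--     # Compute the minimal strength threshold: walking the dragons BACKWARDS,
--     # req is the value the hero's strength must strictly exceed when reaching
--     # this point; before dragon (x, y) the hero must beat x and also exceed
--     # req - y afterwards-wise, so req = max(x, req - y).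
--     req = None
--     for x, y in reversed(nums):
--         req = x if req is None else max(x, req - y)
--     return req is None or s > req
-- ===== Notes on version B (the rewrite author's own statement) =====
-- stated objective: alternative
-- what changed: Instead of simulating the fights forward with a mutating strength, B walks the dragon list backwards computing the minimal required starting strength req via req = max(x, req - y), and ends with a single comparison s > req.
import Mathlib
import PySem

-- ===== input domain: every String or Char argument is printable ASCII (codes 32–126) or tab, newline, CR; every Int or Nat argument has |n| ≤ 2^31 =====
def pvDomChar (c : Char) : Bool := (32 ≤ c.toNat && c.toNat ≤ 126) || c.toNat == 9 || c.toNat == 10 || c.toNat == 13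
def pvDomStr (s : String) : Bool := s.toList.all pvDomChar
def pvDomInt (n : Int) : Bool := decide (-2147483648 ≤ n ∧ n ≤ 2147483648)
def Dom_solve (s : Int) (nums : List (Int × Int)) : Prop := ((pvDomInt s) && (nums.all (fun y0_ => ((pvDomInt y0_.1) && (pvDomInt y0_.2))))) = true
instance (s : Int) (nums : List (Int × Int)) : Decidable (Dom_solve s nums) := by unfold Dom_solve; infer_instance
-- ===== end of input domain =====

-- B replaces A's forward fight simulation by a backward pass computing the minimal required
-- starting strength, then one comparison; objective: alternative algorithm, same cost.


-- ===== PORT A =====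
-- the while-loop popping from the deque, carrying the mutated strength s
def solveLoop (s : Int) (q : List (Int × Int)) : Bool :=
  match q with
  | [] => true
  | (xi, yi) :: rest => if s ≤ xi then false else solveLoop (s + yi) rest

def solve (s : Int) (nums : List (Int × Int)) : Bool := solveLoop s nums

-- ===== PORT B =====
-- 'for x, y in reversed(nums): req = x if req is None else max(x, req - y)'
def solve_alt (s : Int) (nums : List (Int × Int)) : Bool :=
  let req := nums.reverse.foldl
    (fun req p =>
      match req with
      | none => some p.1
      | some r => some (max p.1 (r - p.2))) none
  match req with
  | none => true
  | some r => decide (s > r)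

-- ===== PRECONDITION & SPEC =====
def Spec_solve (s : Int) (nums : List (Int × Int)) (out : Bool) : Prop := out = solve_alt s nums
instance (s : Int) (nums : List (Int × Int)) (out : Bool) : Decidable (Spec_solve s nums out) := by unfold Spec_solve; infer_instance

-- ===== CLAIM (what is proved, stated in full; the proofs are below) =====
def Claim_equal_solve : Prop := ∀ (s : Int) (nums : List (Int × Int)), Dom_solve s nums → Spec_solve s nums (solve s nums)

-- ===== LEMMAS AND PROOFS =====
-- The backward foldl over the reversed list is the foldr of the flipped step.
theorem reqFold_eq_foldr (nums : List (Int × Int)) :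
    nums.reverse.foldl
      (fun req p =>
        match req with
        | none => some p.1
        | some r => some (max p.1 (r - p.2))) (none : Option Int)
    = nums.foldr
      (fun p req =>
        match req with
        | none => some p.1
        | some r => some (max p.1 (r - p.2))) none := by
  rw [List.foldl_reverse]

-- A's simulation succeeds iff s strictly exceeds the backward-computed requirement.
theorem solveLoop_eq_req (s : Int) (nums : List (Int × Int)) :
    solveLoop s nums
    = (match nums.foldr
        (fun p req =>
          match req with
          | none => some p.1
          | some r => some (max p.1 (r - p.2))) (none : Option Int) with
      | none => true
      | some r => decide (s > r)) := by
  induction nums generalizing s with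
  | nil => simp [solveLoop]
  | cons hd tl ih =>
    obtain ⟨x, y⟩ := hd
    simp only [solveLoop, List.foldr_cons]
    rw [ih (s + y)]
    cases h : tl.foldr
        (fun p req =>
          match req with
          | none => some p.1
          | some r => some (max p.1 (r - p.2))) (none : Option Int) with
    | none =>
      by_cases hle : s ≤ x
      · simp [hle, show ¬ (x < s) by omega]
      · simp [hle, show x < s by omega]
    | some r =>
      by_cases hle : s ≤ x
      · simp [hle, show ¬ (x < s) by omega]
      · simp [hle, show x < s by omega]
        omega

-- ===== VERDICT (by name: the statement is the Claim_ definition above) =====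
theorem solve_spec : Claim_equal_solve := by
  intro s nums _
  unfold Spec_solve solve solve_alt
  rw [reqFold_eq_foldr, solveLoop_eq_req]
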